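-- pv_equiv track=rewrite | github.com/google/etils | etils/ecolab/adhoc_error.py | _summarize_leaking_modules
-- ===== SOURCE A (Python) =====
-- import collections
--
-- def _summarize_leaking_modules(modules: list[str]) -> str:
--   """Group leaking modules by top-level package for readability."""
--   groups = collections.defaultdict(list)
--   for mod in modules:
--     top_level = mod.split('.')[0]
--     groups[top_level].append(mod)
--
--   lines = []
--   for top_level in sorted(groups):
--     mods = sorted(groups[top_level])
--     if len(mods) == 1:
--       lines.append(f'  {mods[0]}')
--     else:
--       lines.append(f'  {top_level}.* ({len(mods)} modules)')
--
--   return '\n'.join(lines)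
-- ===== SOURCE B (Python) =====
-- def _summarize_leaking_modules(modules: list[str]) -> str:
--   """Group leaking modules by top-level package for readability."""
--   keyed = sorted(modules, key=lambda m: m.split('.')[0])
--   lines = []
--   i = 0
--   n = len(keyed)
--   while i < n:
--     top = keyed[i].split('.')[0]
--     j = i + 1
--     while j < n and keyed[j].split('.')[0] == top:
--       j += 1
--     mods = sorted(keyed[i:j])
--     if len(mods) == 1:
--       lines.append(f'  {mods[0]}')
--     else:
--       lines.append(f'  {top}.* ({len(mods)} modules)')
--     i = j
--   return '\n'.join(lines)
-- ===== Notes on version B (the rewrite author's own statement) =====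
-- stated objective: alternative
-- what changed: Replaces the defaultdict grouping pass by one stable sort of the whole list keyed on the top-level package followed by a linear scan over contiguous runs; no dict is built.
import Mathlib
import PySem

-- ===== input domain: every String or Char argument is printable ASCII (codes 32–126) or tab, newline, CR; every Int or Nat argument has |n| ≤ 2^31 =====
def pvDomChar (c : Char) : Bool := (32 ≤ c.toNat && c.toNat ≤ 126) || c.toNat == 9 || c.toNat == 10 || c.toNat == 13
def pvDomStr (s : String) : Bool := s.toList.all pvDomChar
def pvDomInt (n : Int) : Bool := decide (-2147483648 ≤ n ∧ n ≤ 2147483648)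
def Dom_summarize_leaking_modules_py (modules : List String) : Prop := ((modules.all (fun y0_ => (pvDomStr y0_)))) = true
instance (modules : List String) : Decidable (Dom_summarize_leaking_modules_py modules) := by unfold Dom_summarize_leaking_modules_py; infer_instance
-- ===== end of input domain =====

-- B drops A's defaultdict: it sorts the whole list once by top-level package and emits one line per contiguous run (alternative decomposition, same result).

-- m.split('.')[0]; a split with a nonempty separator never returns [], so the [0] indexing is exactly headD
def pvTop (m : String) : String := ((PySem.Str.split? m ".").getD []).headD ""

-- ===== PORT A =====
def summarize_leaking_modules_py (modules : List String) : String :=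
  let groups : PySem.Dict String (List String) :=
    modules.foldl (fun d m => d.modify (pvTop m) [] (fun l => l ++ [m])) PySem.Dict.empty
  let lines : List String :=
    (PySem.List.sorted groups.keys (fun x => x) false).foldl
      (fun lines top_level =>
        let mods := PySem.List.sorted (groups.getD top_level []) (fun x => x) false
        if mods.length == 1 then
          lines ++ ["  " ++ mods.headD ""]        -- mods[0]; nonempty since len == 1
        else
          lines ++ ["  " ++ top_level ++ ".* (" ++ PySem.Int.toStr (mods.length : Int) ++ " modules)"])
      []
  PySem.Str.join "\n" lines

-- ===== PORT B =====
-- Source B's outer while loop: peel off one maximal run of equal top-level package per step (the inner j-scan is the takeWhile/dropWhile split)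
def pvRuns (key : String → String) : List String → List (List String)
  | [] => []
  | x :: rest =>
      (x :: rest.takeWhile (fun y => key y == key x)) ::
        pvRuns key (rest.dropWhile (fun y => key y == key x))
termination_by l => l.length
decreasing_by simp only [List.length_cons]; exact Nat.lt_succ_of_le (List.length_dropWhile_le _ _)

def summarize_leaking_modules_py_alt (modules : List String) : String :=
  let keyed := PySem.List.sorted modules pvTop false
  let lines : List String :=
    (pvRuns pvTop keyed).map (fun run =>
      let top := pvTop (run.headD "")              -- keyed[i].split('.')[0]; a run is nonempty
      let mods := PySem.List.sorted run (fun x => x) false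
      if mods.length == 1 then "  " ++ mods.headD ""   -- mods[0]
      else "  " ++ top ++ ".* (" ++ PySem.Int.toStr (mods.length : Int) ++ " modules)")
  PySem.Str.join "\n" lines

-- ===== PRECONDITION & SPEC =====
def Spec_summarize_leaking_modules_py (modules : List String) (out : String) : Prop := out = summarize_leaking_modules_py_alt modules
instance (modules : List String) (out : String) : Decidable (Spec_summarize_leaking_modules_py modules out) := by unfold Spec_summarize_leaking_modules_py; infer_instance

-- ===== CLAIM (what is proved, stated in full; the proofs are below) =====
def Claim_equal_summarize_leaking_modules_py : Prop := ∀ (modules : List String), Dom_summarize_leaking_modules_py modules → Spec_summarize_leaking_modules_py modules (summarize_leaking_modules_py modules)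

-- ===== LEMMAS AND PROOFS =====

theorem pv_mem_filter_key {xs : List String} {t y : String}
    (h : y ∈ xs.filter (fun m => pvTop m == t)) : pvTop y = t := by
  have := (List.mem_filter.mp h).2
  simpa using this

-- A's defaultdict group for key t is exactly the in-order filter of the input by top-level package
theorem pv_getD_groups (modules : List String) (t : String) :
    (modules.foldl (fun d m => d.modify (pvTop m) [] (fun l => l ++ [m])) PySem.Dict.empty).getD t []
      = modules.filter (fun m => pvTop m == t) := by
  have h := PySem.Dict.getD_foldl_modify_append
    (l := modules.map (fun m => (pvTop m, m))) (d := PySem.Dict.empty) (c := t)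
  rw [List.foldl_map] at h
  simpa [List.filter_map, List.map_map, Function.comp_def] using h

-- A's dict keys are, as a list, the first-occurrence set of top-level packages
theorem pv_keys_groups (modules : List String) :
    (modules.foldl (fun d m => d.modify (pvTop m) [] (fun l => l ++ [m])) PySem.Dict.empty).keys
      = PySem.Set.ofList (modules.map pvTop) := by
  rw [PySem.Dict.keys_foldl_modify_key]
  simp [PySem.Set.update, PySem.Set.ofList, PySem.Dict.keys_empty]

-- insertion skips a block none of whose elements the new element goes before
theorem pv_insertBy_skip {before : String → String → Bool} {x : String} (as bs : List String)
    (h : ∀ a ∈ as, before x a = false) :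
    PySem.List.insertBy before x (as ++ bs) = as ++ PySem.List.insertBy before x bs := by
  induction as with
  | nil => rfl
  | cons a as ih =>
      simp only [List.cons_append, PySem.List.insertBy, h a (by simp)]
      simp only [Bool.false_eq_true, if_false, List.cons.injEq, true_and]
      exact ih (fun a ha => h a (by simp [ha]))

-- insertion lands at the front of a block it goes before entirely
theorem pv_insertBy_front {before : String → String → Bool} {x : String} (ys : List String)
    (h : ∀ y ∈ ys, before x y = true) :
    PySem.List.insertBy before x ys = x :: ys := by
  cases ys with
  | nil => rfl
  | cons y ys => simp [PySem.List.insertBy, h y (by simp)]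

-- stability core: inserting x into the grouped form appends it to its own (present) group
theorem pv_insert_into_groups (ks : List String) (xs : List String) (x : String)
    (hpw : ks.Pairwise (· < ·)) (hx : pvTop x ∈ ks) :
    PySem.List.insertBy (fun a b => decide (pvTop a < pvTop b)) x
        (ks.flatMap (fun t => xs.filter (fun m => pvTop m == t)))
      = ks.flatMap (fun t => xs.filter (fun m => pvTop m == t)
            ++ (if pvTop x == t then [x] else [])) := by
  induction ks with
  | nil => cases hx
  | cons t ks ih =>
      have hlt : ∀ u ∈ ks, t < u := (List.pairwise_cons.mp hpw).1
      have hpw' : ks.Pairwise (· < ·) := (List.pairwise_cons.mp hpw).2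
      simp only [List.flatMap_cons]
      by_cases hxt : pvTop x = t
      · rw [pv_insertBy_skip _ _ (fun a ha => by
            have := pv_mem_filter_key ha
            simp [this, hxt])]
        rw [pv_insertBy_front _ (fun y hy => by
            obtain ⟨u, hu, hyu⟩ := List.mem_flatMap.mp hy
            have : pvTop y = u := pv_mem_filter_key hyu
            simp [this, hxt, hlt u hu])]
        have hcongr : List.flatMap (fun u => xs.filter (fun m => pvTop m == u)
              ++ (if pvTop x == u then [x] else [])) ks
            = List.flatMap (fun u => xs.filter (fun m => pvTop m == u)) ks :=
          List.flatMap_congr (fun u hu => by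
            have : pvTop x ≠ u := by
              have := hlt u hu; rw [hxt]; exact ne_of_lt this
            simp [this])
        rw [hcongr]
        simp [hxt]
      · have hx' : pvTop x ∈ ks := by
          rcases hx with _ | h
          · exact absurd rfl hxt
          · assumption
        have htx : t < pvTop x := hlt _ hx'
        rw [pv_insertBy_skip _ _ (fun a ha => by
            have := pv_mem_filter_key ha
            simp only [this, decide_eq_false_iff_not]
            exact fun h => absurd (lt_trans htx h) (lt_irrefl _))]
        rw [ih hpw' hx']
        have : (pvTop x == t) = false := by simp [hxt]
        simp [this]

-- the stable sort by top-level package is the concatenation of the in-order groups, one per sorted distinct key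
theorem pv_sorted_flatMap (ks : List String) (xs : List String)
    (hpw : ks.Pairwise (· < ·)) (hmem : ∀ m ∈ xs, pvTop m ∈ ks) :
    PySem.List.sorted xs pvTop false
      = ks.flatMap (fun t => xs.filter (fun m => pvTop m == t)) := by
  induction xs using List.reverseRecOn with
  | nil => rw [PySem.List.sorted_eq_foldl_insertBy]; simp
  | append_singleton xs x ih =>
      have hsx : PySem.List.sorted (xs ++ [x]) pvTop false
          = PySem.List.insertBy (fun a b => decide (pvTop a < pvTop b)) x
              (PySem.List.sorted xs pvTop false) := by
        rw [PySem.List.sorted_eq_foldl_insertBy, List.foldl_append,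
          ← PySem.List.sorted_eq_foldl_insertBy]
        rfl
      rw [hsx, ih (fun m hm => hmem m (by simp [hm])),
        pv_insert_into_groups ks xs x hpw (hmem x (by simp))]
      apply List.flatMap_congr
      intro u _
      simp [List.filter_append, List.filter_cons]

-- pvRuns splits off one whole nonempty constant-key block whose key does not continue into the rest
theorem pv_pvRuns_block (t y : String) (r rest : List String)
    (hall : ∀ z ∈ y :: r, pvTop z = t) (hrest : ∀ w ∈ rest, pvTop w ≠ t) :
    pvRuns pvTop ((y :: r) ++ rest) = (y :: r) :: pvRuns pvTop rest := by
  have hy : pvTop y = t := hall y (by simp)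
  have htw : (r ++ rest).takeWhile (fun z => pvTop z == pvTop y) = r := by
    rw [List.takeWhile_append]
    have hr : r.takeWhile (fun z => pvTop z == pvTop y) = r :=
      List.takeWhile_eq_self_iff.mpr (fun z hz => by simp [hall z (by simp [hz]), hy])
    rw [hr]
    have : rest.takeWhile (fun z => pvTop z == pvTop y) = [] := by
      cases rest with
      | nil => rfl
      | cons w ws =>
          have : (pvTop w == pvTop y) = false := by
            simp [hy, hrest w (by simp)]
          simp [List.takeWhile, this]
    simp [this]
  have hdw : (r ++ rest).dropWhile (fun z => pvTop z == pvTop y) = rest := by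
    rw [List.dropWhile_append]
    have hr : r.dropWhile (fun z => pvTop z == pvTop y) = [] :=
      List.dropWhile_eq_nil_iff.mpr (fun z hz => by simp [hall z (by simp [hz]), hy])
    rw [hr]
    simp only [List.isEmpty_nil]
    cases rest with
    | nil => rfl
    | cons w ws =>
        have : (pvTop w == pvTop y) = false := by
          simp [hy, hrest w (by simp)]
        simp [List.dropWhile, this]
  simp only [List.cons_append, pvRuns, htw, hdw]

-- pvRuns recovers exactly the groups of the grouped form
theorem pv_pvRuns_flatMap (ks : List String) (g : String → List String)
    (hpw : ks.Pairwise (· < ·))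
    (hne : ∀ t ∈ ks, g t ≠ [])
    (hkey : ∀ t ∈ ks, ∀ z ∈ g t, pvTop z = t) :
    pvRuns pvTop (ks.flatMap g) = ks.map g := by
  induction ks with
  | nil => simp [pvRuns]
  | cons t ks ih =>
      have hlt : ∀ u ∈ ks, t < u := (List.pairwise_cons.mp hpw).1
      obtain ⟨y, r, hyr⟩ := List.exists_cons_of_ne_nil (hne t (by simp))
      simp only [List.flatMap_cons, List.map_cons, hyr]
      rw [pv_pvRuns_block t y r _
          (by rw [← hyr]; exact hkey t (by simp))
          (fun w hw => by
            obtain ⟨u, hu, hwu⟩ := List.mem_flatMap.mp hw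
            rw [hkey u (by simp [hu]) w hwu]
            exact ne_of_gt (hlt u hu))]
      rw [ih (List.pairwise_cons.mp hpw).2
          (fun u hu => hne u (by simp [hu]))
          (fun u hu => hkey u (by simp [hu]))]

-- ===== VERDICT (by name: the statement is the Claim_ definition above) =====
theorem summarize_leaking_modules_py_spec : Claim_equal_summarize_leaking_modules_py := by
  intro modules _
  unfold Spec_summarize_leaking_modules_py summarize_leaking_modules_py summarize_leaking_modules_py_alt
  simp only [pv_keys_groups, pv_getD_groups]
  set ks := PySem.List.sorted (PySem.Set.ofList (modules.map pvTop)) (fun x => x) false with hks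
  have hpw : ks.Pairwise (· < ·) := PySem.List.sorted_ofList_pairwise_lt _
  have hmem : ∀ m ∈ modules, pvTop m ∈ ks := by
    intro m hm
    rw [hks, PySem.List.mem_sorted, PySem.Set.mem_ofList]
    exact List.mem_map.mpr ⟨m, hm, rfl⟩
  have hmemks : ∀ t ∈ ks, ∃ m ∈ modules, pvTop m = t := by
    intro t ht
    rw [hks, PySem.List.mem_sorted, PySem.Set.mem_ofList] at ht
    exact List.mem_map.mp ht
  -- B's sorted list decomposes into the per-key groups, and pvRuns recovers them
  rw [pv_sorted_flatMap ks modules hpw hmem,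
    pv_pvRuns_flatMap ks _ hpw
      (fun t ht => by
        obtain ⟨m, hm, hmt⟩ := hmemks t ht
        exact List.ne_nil_of_mem (List.mem_filter.mpr ⟨hm, by simp [hmt]⟩))
      (fun t _ z hz => pv_mem_filter_key hz)]
  -- A's foldl builds the same lines group by group
  rw [show (fun (lines : List String) top_level =>
        let mods := PySem.List.sorted (modules.filter (fun m => pvTop m == top_level)) (fun x => x) false
        if mods.length == 1 then lines ++ ["  " ++ mods.headD ""]
        else lines ++ ["  " ++ top_level ++ ".* (" ++ PySem.Int.toStr (mods.length : Int) ++ " modules)"])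
      = (fun lines t => lines ++ [(fun t =>
          let mods := PySem.List.sorted (modules.filter (fun m => pvTop m == t)) (fun x => x) false
          if mods.length == 1 then "  " ++ mods.headD ""
          else "  " ++ t ++ ".* (" ++ PySem.Int.toStr (mods.length : Int) ++ " modules)") t]) from by
        funext lines t; simp only []; split <;> rfl]
  rw [show ∀ (f : String → String), List.foldl (fun (lines : List String) t => lines ++ [f t]) [] ks = ks.map f from
        fun f => by simpa using PySem.List.foldl_append_singleton_eq_map f ks []]
  rw [List.map_map]
  congr 1
  apply List.map_congr_left
  intro t ht
  obtain ⟨y, r, hyr⟩ := List.exists_cons_of_ne_nil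
    (show modules.filter (fun m => pvTop m == t) ≠ [] from by
      obtain ⟨m, hm, hmt⟩ := hmemks t ht
      exact List.ne_nil_of_mem (List.mem_filter.mpr ⟨hm, by simp [hmt]⟩))
  have hy : pvTop y = t := pv_mem_filter_key (by rw [hyr]; simp)
  simp only [Function.comp_apply, hyr, List.headD_cons, hy]
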